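-- pv_equiv track=rewrite | github.com/trzcinskipiotr/ideasport | ideasport_app/models.py | _split_table_by_points
-- ===== SOURCE A (Python) =====
-- def _split_table_by_points(sorted_table_by_points):
--     if len(sorted_table_by_points) == 0:
--         return []
--     splits = []
--     current_score = sorted_table_by_points[0]['points']
--     current_split = []
--     for score in sorted_table_by_points:
--         if score['points'] == current_score:
--             current_split.append(score)
--         else:
--             splits.append(current_split)
--             current_split = []
--             current_split.append(score)
--             current_score = score['points']
--     if len(current_split) > 0:
--         splits.append(current_split)
--     return splits
-- ===== SOURCE B (Python) =====
-- def _split_table_by_points(sorted_table_by_points):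
--     # two-pointer scan: for each group find its end index, slice it out
--     splits = []
--     i = 0
--     n = len(sorted_table_by_points)
--     while i < n:
--         p = sorted_table_by_points[i]['points']
--         j = i + 1
--         while j < n and sorted_table_by_points[j]['points'] == p:
--             j += 1
--         splits.append(sorted_table_by_points[i:j])
--         i = j
--     return splits
-- ===== Notes on version B (the rewrite author's own statement) =====
-- stated objective: alternative
-- what changed: A maintains a running current_split/current_score accumulator that it flushes on each points change; B instead uses a two-pointer scan that finds the end index of each run of equal points and slices that whole run out of the list in one step.
import Mathlib
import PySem

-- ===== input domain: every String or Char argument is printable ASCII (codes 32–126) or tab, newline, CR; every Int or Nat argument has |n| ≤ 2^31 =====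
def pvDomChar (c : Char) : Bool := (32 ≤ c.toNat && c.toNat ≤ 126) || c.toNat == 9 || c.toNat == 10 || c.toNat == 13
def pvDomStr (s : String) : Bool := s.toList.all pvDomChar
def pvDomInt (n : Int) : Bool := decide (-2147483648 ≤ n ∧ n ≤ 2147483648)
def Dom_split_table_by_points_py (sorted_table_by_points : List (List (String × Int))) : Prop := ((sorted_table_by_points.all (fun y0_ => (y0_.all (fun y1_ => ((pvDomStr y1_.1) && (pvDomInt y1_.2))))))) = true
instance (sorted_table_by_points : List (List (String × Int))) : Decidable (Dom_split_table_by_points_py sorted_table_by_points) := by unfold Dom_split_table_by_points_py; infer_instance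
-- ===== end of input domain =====

-- B replaces A's running-accumulator loop by a two-pointer scan that finds each
-- group's end and slices it out (objective: alternative decomposition, same cost).


-- row['points']; Pre_ guarantees the key is present, so the .getD 0 default is never used
def pvPoints (r : List (String × Int)) : Int := ((PySem.Dict.mk r).get? "points").getD 0

-- ===== PORT A =====
-- the for-loop: state = (splits, current_split, current_score)
def pvALoop (xs : List (List (String × Int)))
    (splits : List (List (List (String × Int))))
    (cur : List (List (String × Int))) (p : Int) :
    List (List (List (String × Int))) × List (List (String × Int)) × Int :=
  match xs with
  | [] => (splits, cur, p)
  | x :: rest =>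
    if pvPoints x == p then pvALoop rest splits (cur ++ [x]) p
    else pvALoop rest (splits ++ [cur]) [x] (pvPoints x)

def split_table_by_points_py (sorted_table_by_points : List (List (String × Int))) : List (List (List (String × Int))) :=
  match sorted_table_by_points with
  | [] => []
  | x :: _ =>
    let r := pvALoop sorted_table_by_points [] [] (pvPoints x)
    if 0 < r.2.1.length then r.1 ++ [r.2.1] else r.1

-- ===== PORT B =====
-- the inner while: how far j advances past i (count of following rows with equal points)
def pvBSpan (p : Int) : List (List (String × Int)) → Nat
  | [] => 0
  | x :: rest => if pvPoints x == p then pvBSpan p rest + 1 else 0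

-- the outer while: i < n → slice t[i:j] out, continue at i = j
def split_table_by_points_py_alt (sorted_table_by_points : List (List (String × Int))) : List (List (List (String × Int))) :=
  match sorted_table_by_points with
  | [] => []
  | x :: rest =>
    (x :: rest.take (pvBSpan (pvPoints x) rest)) ::
      split_table_by_points_py_alt (rest.drop (pvBSpan (pvPoints x) rest))
termination_by sorted_table_by_points.length
decreasing_by simp [List.length_drop]

-- ===== PRECONDITION & SPEC =====
-- Pre_: every row has the key 'points' (otherwise Python raises KeyError on the lookup)
def Pre_split_table_by_points_py (sorted_table_by_points : List (List (String × Int))) : Prop :=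
  ∀ r ∈ sorted_table_by_points, ((PySem.Dict.mk r).get? "points").isSome = true
instance (sorted_table_by_points : List (List (String × Int))) : Decidable (Pre_split_table_by_points_py sorted_table_by_points) := by unfold Pre_split_table_by_points_py; infer_instance
def pvWitness_split_table_by_points_py : (List (List (String × Int))) := [[("points", 3)], [("points", 3)], [("points", 1)]]
def Spec_split_table_by_points_py (sorted_table_by_points : List (List (String × Int))) (out : List (List (List (String × Int)))) : Prop := out = split_table_by_points_py_alt sorted_table_by_points
instance (sorted_table_by_points : List (List (String × Int))) (out : List (List (List (String × Int)))) : Decidable (Spec_split_table_by_points_py sorted_table_by_points out) := by unfold Spec_split_table_by_points_py; infer_instance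

-- ===== CLAIM (what is proved, stated in full; the proofs are below) =====
def Claim_equal_split_table_by_points_py : Prop := ∀ (sorted_table_by_points : List (List (String × Int))), Dom_split_table_by_points_py sorted_table_by_points → Pre_split_table_by_points_py sorted_table_by_points → Spec_split_table_by_points_py sorted_table_by_points (split_table_by_points_py sorted_table_by_points)

-- ===== LEMMAS AND PROOFS =====

theorem alt_nil : split_table_by_points_py_alt [] = [] := by
  unfold split_table_by_points_py_alt
  rfl

theorem pvBSpan_take (p : Int) (xs : List (List (String × Int))) :
    xs.take (pvBSpan p xs) = xs.takeWhile (fun y => pvPoints y == p) := by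
  induction xs with
  | nil => rfl
  | cons x rest ih =>
    by_cases h : pvPoints x == p <;> simp [pvBSpan, List.takeWhile, h, ih]

theorem pvBSpan_drop (p : Int) (xs : List (List (String × Int))) :
    xs.drop (pvBSpan p xs) = xs.dropWhile (fun y => pvPoints y == p) := by
  induction xs with
  | nil => rfl
  | cons x rest ih =>
    by_cases h : pvPoints x == p <;> simp [pvBSpan, List.dropWhile, h, ih]

theorem alt_cons (x : List (String × Int)) (rest : List (List (String × Int))) :
    split_table_by_points_py_alt (x :: rest) =
      (x :: rest.takeWhile (fun y => pvPoints y == pvPoints x)) ::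
        split_table_by_points_py_alt (rest.dropWhile (fun y => pvPoints y == pvPoints x)) := by
  rw [split_table_by_points_py_alt.eq_def]
  dsimp only
  rw [pvBSpan_take, pvBSpan_drop]

def pvFinish (s : List (List (List (String × Int))) × List (List (String × Int)) × Int) :
    List (List (List (String × Int))) :=
  if 0 < s.2.1.length then s.1 ++ [s.2.1] else s.1

theorem pvALoop_inv (xs : List (List (String × Int))) :
    ∀ (splits : List (List (List (String × Int)))) (cur : List (List (String × Int))) (p : Int),
      cur ≠ [] →
      pvFinish (pvALoop xs splits cur p) =
        splits ++ (cur ++ xs.takeWhile (fun y => pvPoints y == p)) ::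
          split_table_by_points_py_alt (xs.dropWhile (fun y => pvPoints y == p)) := by
  induction xs with
  | nil =>
    intro splits cur p hc
    simp [pvALoop, pvFinish, List.length_pos_iff, hc, alt_nil]
  | cons x rest ih =>
    intro splits cur p hc
    by_cases h : pvPoints x == p
    · rw [show pvALoop (x :: rest) splits cur p = pvALoop rest splits (cur ++ [x]) p from by
        simp [pvALoop, h]]
      rw [ih _ _ _ (by simp)]
      simp [List.takeWhile, List.dropWhile, h]
    · rw [show pvALoop (x :: rest) splits cur p = pvALoop rest (splits ++ [cur]) [x] (pvPoints x) from by
        simp [pvALoop, h]]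
      rw [ih _ _ _ (by simp)]
      simp only [List.takeWhile, List.dropWhile, h]
      rw [alt_cons]
      simp

-- ===== VERDICT (by name: the statement is the Claim_ definition above) =====
theorem split_table_by_points_py_spec : Claim_equal_split_table_by_points_py := by
  intro t _ _
  unfold Spec_split_table_by_points_py
  match t with
  | [] => simp [split_table_by_points_py, alt_nil]
  | x :: rest =>
    show pvFinish (pvALoop (x :: rest) [] [] (pvPoints x)) = _
    rw [show pvALoop (x :: rest) [] [] (pvPoints x)
          = pvALoop rest [] [x] (pvPoints x) from by simp [pvALoop]]
    rw [pvALoop_inv rest [] [x] (pvPoints x) (by simp)]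
    rw [alt_cons]
    simp
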